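-- pv_equiv track=rewrite | github.com/shmygov/browserpedals | src/browserpedals/pedals/detect/detectpedals.py | get_non_empty_combinations
-- ===== SOURCE A (Python) =====
-- def get_all_combinations(elements_list):
--     if len(elements_list) == 0:
--         return [[]]
--     elem = elements_list[-1]
--     combinations1 = get_all_combinations(elements_list[:-1])
--     combinations2 = combinations1[:]
--     for comb1 in combinations1:
--         comb2 = comb1[:]
--         comb2.append(elem)
--         combinations2.append(comb2)
--     return combinations2
--
-- def get_non_empty_combinations(elements_list):
--     combinations1 = get_all_combinations(elements_list)
--     combinations2 = []
--     for i in range(len(elements_list), 0, -1):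
--         for comb1 in combinations1:
--             if len(comb1) == i:
--                 combinations2.append(comb1)
--     return combinations2
-- ===== SOURCE B (Python) =====
-- def get_non_empty_combinations(elements_list):
--     # Build all subsets in one left-to-right pass, bucket them by size in one pass,
--     # then concatenate the buckets largest-first (one scan instead of n).
--     all_combs = [[]]
--     for elem in elements_list:
--         all_combs += [c + [elem] for c in all_combs]
--     n = len(elements_list)
--     buckets = [[] for _ in range(n + 1)]
--     for c in all_combs:
--         buckets[len(c)].append(c)
--     result = []
--     for b in reversed(buckets[1:]):
--         result += b
--     return result
-- ===== Notes on version B (the rewrite author's own statement) =====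
-- stated objective: alternative
-- what changed: Instead of generating all subsets by peeling the last element recursively and then scanning the whole 2^n-element subset list once per size (n passes), B builds the subsets in one left-to-right fold, buckets them by length in a single pass, and concatenates the buckets largest-first.
import Mathlib
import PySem

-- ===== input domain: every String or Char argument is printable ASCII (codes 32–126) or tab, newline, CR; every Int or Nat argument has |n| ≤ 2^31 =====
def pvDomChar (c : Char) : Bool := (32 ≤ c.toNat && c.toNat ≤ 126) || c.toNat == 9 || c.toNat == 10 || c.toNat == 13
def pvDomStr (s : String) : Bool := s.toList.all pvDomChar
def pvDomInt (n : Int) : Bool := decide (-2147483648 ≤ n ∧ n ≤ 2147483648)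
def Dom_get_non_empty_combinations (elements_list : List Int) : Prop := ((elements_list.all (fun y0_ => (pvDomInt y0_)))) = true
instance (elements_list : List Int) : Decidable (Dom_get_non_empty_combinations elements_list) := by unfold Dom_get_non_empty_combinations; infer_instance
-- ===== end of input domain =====

-- B replaces A's n passes over all 2^n subsets (one per size) by a single bucketing pass
-- concatenated largest-first; same return value, different algorithm.

-- ===== PORT A =====
-- helper of A: all subsets, peeling the LAST element recursively.
-- 'elements_list[-1]' on a non-empty list is exactly getLast; 'elements_list[:-1]' is exactly dropLast.
def get_all_combinations (l : List Int) : List (List Int) :=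
  if h : l.length = 0 then [[]]
  else
    let elem := l.getLast (fun he => h (by simp [he]))
    let c1 := get_all_combinations l.dropLast
    -- combinations2 = combinations1[:]; for comb1 in combinations1: append comb1+[elem]
    c1.foldl (fun acc c => acc ++ [c ++ [elem]]) c1
termination_by l.length
decreasing_by simp [List.length_dropLast]; omega

def get_non_empty_combinations (elements_list : List Int) : List (List Int) :=
  let c1 := get_all_combinations elements_list
  (PySem.List.pyRange (elements_list.length : Int) 0 (-1)).foldl
    (fun acc i => c1.foldl (fun acc2 c => if (c.length : Int) = i then acc2 ++ [c] else acc2) acc) []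

-- ===== PORT B =====
def get_non_empty_combinations_alt (elements_list : List Int) : List (List Int) :=
  -- all_combs built left-to-right: all_combs += [c + [elem] for c in all_combs]
  let all := elements_list.foldl (fun acc e => acc ++ acc.map (fun c => c ++ [e])) [[]]
  let n := elements_list.length
  -- buckets = [[] for _ in range(n+1)]; buckets[len(c)].append(c)
  let buckets := all.foldl
    (fun (bs : List (List (List Int))) c => bs.set c.length (bs.getD c.length [] ++ [c]))
    (List.replicate (n + 1) [])
  -- for b in reversed(buckets[1:]): result += b
  ((buckets.drop 1).reverse).foldl (fun r b => r ++ b) []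

-- ===== PRECONDITION & SPEC =====
def Spec_get_non_empty_combinations (elements_list : List Int) (out : List (List Int)) : Prop := out = get_non_empty_combinations_alt elements_list
instance (elements_list : List Int) (out : List (List Int)) : Decidable (Spec_get_non_empty_combinations elements_list out) := by unfold Spec_get_non_empty_combinations; infer_instance

-- ===== CLAIM (what is proved, stated in full; the proofs are below) =====
def Claim_equal_get_non_empty_combinations : Prop := ∀ (elements_list : List Int), Dom_get_non_empty_combinations elements_list → Spec_get_non_empty_combinations elements_list (get_non_empty_combinations elements_list)

-- ===== LEMMAS AND PROOFS =====

-- the subset-extension step shared (after loop-shape rewriting) by both generators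
def subsStep (acc : List (List Int)) (e : Int) : List (List Int) :=
  acc ++ acc.map (fun c => c ++ [e])

lemma gac_eq_foldl (l : List Int) :
    get_all_combinations l = l.foldl subsStep [[]] := by
  induction l using List.reverseRecOn with
  | nil => simp [get_all_combinations]
  | append_singleton xs x ih =>
      rw [get_all_combinations]
      simp only [List.length_append, List.length_cons]
      rw [dif_neg (by simp)]
      simp only [List.getLast_concat, List.dropLast_concat]
      rw [PySem.List.foldl_append_singleton_eq_map, List.foldl_append]
      simp [subsStep, ih]

lemma foldl_subs_len (l : List Int) :
    ∀ (acc : List (List Int)) (k : Nat), (∀ c ∈ acc, c.length ≤ k) →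
      ∀ c ∈ l.foldl subsStep acc, c.length ≤ k + l.length := by
  induction l with
  | nil => intro acc k h c hc; simpa using h c hc
  | cons e l ih =>
      intro acc k h c hc
      simp only [List.foldl_cons] at hc
      have := ih (subsStep acc e) (k + 1) ?_ c hc
      · simpa [Nat.add_assoc, Nat.add_comm 1] using this
      · intro d hd
        rcases List.mem_append.mp hd with hd | hd
        · exact Nat.le_succ_of_le (h d hd)
        · rcases List.mem_map.mp hd with ⟨d', hd', rfl⟩
          simpa using Nat.succ_le_succ (h d' hd')

-- the bucketing step of B
def bstep (bs : List (List (List Int))) (c : List Int) : List (List (List Int)) :=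
  bs.set c.length (bs.getD c.length [] ++ [c])

lemma bstep_length (bs : List (List (List Int))) (c : List Int) :
    (bstep bs c).length = bs.length := by simp [bstep]

lemma bucket_getD (xs : List (List Int)) :
    ∀ (bs : List (List (List Int))) (j : Nat), (∀ c ∈ xs, c.length < bs.length) →
      (xs.foldl bstep bs).getD j [] = bs.getD j [] ++ xs.filter (fun c => c.length == j) := by
  induction xs with
  | nil => intro bs j _; simp
  | cons c xs ih =>
      intro bs j h
      have hc : c.length < bs.length := h c (by simp)
      simp only [List.foldl_cons]
      rw [ih (bstep bs c) j (by intro d hd; rw [bstep_length]; exact h d (by simp [hd]))]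
      by_cases hj : c.length = j
      · subst hj
        have : (bstep bs c).getD c.length [] = bs.getD c.length [] ++ [c] := by
          simp [bstep, List.getD, hc]
        rw [this]
        simp
      · have : (bstep bs c).getD j [] = bs.getD j [] := by
          simp [bstep, List.getD, List.getElem?_set_ne hj]
        rw [this]
        simp [hj]

lemma bucket_length (xs : List (List Int)) :
    ∀ bs : List (List (List Int)), (xs.foldl bstep bs).length = bs.length := by
  induction xs with
  | nil => intro bs; simp
  | cons c xs ih => intro bs; simp [List.foldl_cons, ih, bstep_length]

-- descending concatenation of the size-j buckets, j, j-1, …, 1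
def sizes (all : List (List Int)) : Nat → List (List Int)
  | 0 => []
  | j + 1 => all.filter (fun c => c.length == j + 1) ++ sizes all j

lemma a_side (all : List (List Int)) (j : Nat) :
    (PySem.List.pyRange (j : Int) 0 (-1)).flatMap
        (fun i => all.filter (fun c => decide ((c.length : Int) = i))) = sizes all j := by
  induction j with
  | zero => simp [PySem.List.pyRange_neg_one_eq_nil, sizes]
  | succ j ih =>
      rw [PySem.List.pyRange_neg_one_cons (by exact_mod_cast Nat.succ_pos j),
          show ((j + 1 : Nat) : Int) - 1 = (j : Int) by push_cast; ring]
      rw [List.flatMap_cons, ih]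
      simp only [sizes]
      congr 1
      apply List.filter_congr
      intro c _
      have hh : ((c.length : Int) = (j : Int) + 1) ↔ c.length = j + 1 := by
        constructor <;> omega
      rw [Bool.eq_iff_iff]
      simp [hh]

lemma b_side (all : List (List Int)) (j : Nat) :
    ((((List.range j).map (fun k => all.filter (fun c => c.length == k + 1))).reverse)).flatten
      = sizes all j := by
  induction j with
  | zero => simp [sizes]
  | succ j ih => simp [List.range_succ, sizes, ih]

theorem main_eq (l : List Int) :
    get_non_empty_combinations l = get_non_empty_combinations_alt l := by
  unfold get_non_empty_combinations get_non_empty_combinations_alt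
  rw [show (fun (acc : List (List Int)) (e : Int) => acc ++ acc.map (fun c => c ++ [e]))
      = subsStep from rfl]
  rw [show (fun (bs : List (List (List Int))) (c : List Int) =>
        bs.set c.length (bs.getD c.length [] ++ [c])) = bstep from rfl]
  rw [gac_eq_foldl]
  set all := l.foldl subsStep [[]] with hall
  have hlen : ∀ c ∈ all, c.length ≤ l.length := by
    intro c hc
    simpa using foldl_subs_len l [[]] 0 (by simp) c hc
  have hbuckets : (all.foldl bstep (List.replicate (l.length + 1) [])) =
      (List.range (l.length + 1)).map (fun j => all.filter (fun c => c.length == j)) := by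
    apply List.ext_getElem
    · simp [bucket_length]
    · intro i h1 h2
      have hi : i < l.length + 1 := by simpa [bucket_length] using h1
      have hg := bucket_getD all (List.replicate (l.length + 1) []) i
        (by intro c hc; simp only [List.length_replicate]; exact Nat.lt_succ_of_le (hlen c hc))
      rw [List.getD_eq_getElem?_getD, List.getElem?_eq_getElem h1] at hg
      simp only [Option.getD_some] at hg
      rw [hg]
      simp [List.getD, hi]
  simp only [PySem.List.foldl_append_ite_eq_filter]
  rw [PySem.List.foldl_append_eq_flatMap, a_side, hbuckets,
      PySem.List.foldl_append_eq_flatten, List.range_succ_eq_map]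
  simp only [List.map_cons, List.drop_succ_cons, List.drop_zero, List.map_map, List.nil_append]
  rw [show ((fun j => all.filter (fun c => c.length == j)) ∘ Nat.succ)
      = (fun k => all.filter (fun c => c.length == k + 1)) from rfl]
  exact (b_side all l.length).symm

-- ===== VERDICT (by name: the statement is the Claim_ definition above) =====
theorem get_non_empty_combinations_spec : Claim_equal_get_non_empty_combinations := by
  intro l _
  exact main_eq l
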